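-- pv_equiv track=rewrite | github.com/EStroiu/memory-augmentation | scripts/template_summary.py | heuristic_summary
-- ===== SOURCE A (Python) =====
-- from typing import Any, Dict, Iterable, List, Tuple, Optional
-- from collections import defaultdict
--
-- def heuristic_summary(text: str) -> str:
--     lines = [ln.strip() for ln in text.splitlines() if ln.strip()]
--     party = "unknown"
--     vote = "unknown"
--     result = "unknown"
--     n_msgs = 0
--     speakers: Dict[str, int] = defaultdict(int)
--     for ln in lines:
--         if ln.startswith("- Proposed party:"):
--             party = ln.split(":", 1)[-1].strip()
--         elif ln.startswith("- Party vote:"):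
--             vote = ln.split(":", 1)[-1].strip()
--         elif ln.startswith("- Quest result:"):
--             result = ln.split(":", 1)[-1].strip()
--         elif ln.startswith("[Turn "):
--             n_msgs += 1
--             try:
--                 rest = ln.split("]", 1)[-1].strip()
--                 sp = rest.split(":", 1)[0]
--                 speakers[sp] += 1
--             except Exception:
--                 pass
--     top_speakers = ", ".join([f"{s}({c})" for s, c in sorted(speakers.items(), key=lambda x: -x[1])[:3]]) or "none"
--     return ("\n".join([
--         "HEURISTIC SUMMARY:",
--         f"- Party: {party}",
--         f"- Vote: {vote}",
--         f"- Result: {result}",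
--         f"- Messages: {n_msgs}",
--         f"- Top speakers: {top_speakers}",
--     ]) + "\n")
-- ===== SOURCE B (Python) =====
-- def heuristic_summary(text: str) -> str:
--     lines = [ln.strip() for ln in text.splitlines() if ln.strip()]
--
--     def field(prefix):
--         vals = [ln.split(":", 1)[-1].strip() for ln in lines if ln.startswith(prefix)]
--         return vals[-1] if vals else "unknown"
--
--     turns = [ln for ln in lines if ln.startswith("[Turn ")]
--     counts = {}
--     for ln in turns:
--         sp = ln.split("]", 1)[-1].strip().split(":", 1)[0]
--         counts[sp] = counts.get(sp, 0) + 1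
--     top = sorted(counts.items(), key=lambda x: -x[1])[:3]
--     top_speakers = ", ".join(f"{s}({c})" for s, c in top) or "none"
--     return (
--         "HEURISTIC SUMMARY:\n"
--         f"- Party: {field('- Proposed party:')}\n"
--         f"- Vote: {field('- Party vote:')}\n"
--         f"- Result: {field('- Quest result:')}\n"
--         f"- Messages: {len(turns)}\n"
--         f"- Top speakers: {top_speakers}\n"
--     )
-- ===== Notes on version B (the rewrite author's own statement) =====
-- stated objective: simpler
-- what changed: Replaces A's fused five-field dispatch loop with mutable state by a field-by-field decomposition: each config field is the last line matching its prefix, the message count is the length of the turn-line sublist, and the speaker counter is built in its own pass over just the turn lines.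
import Mathlib
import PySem

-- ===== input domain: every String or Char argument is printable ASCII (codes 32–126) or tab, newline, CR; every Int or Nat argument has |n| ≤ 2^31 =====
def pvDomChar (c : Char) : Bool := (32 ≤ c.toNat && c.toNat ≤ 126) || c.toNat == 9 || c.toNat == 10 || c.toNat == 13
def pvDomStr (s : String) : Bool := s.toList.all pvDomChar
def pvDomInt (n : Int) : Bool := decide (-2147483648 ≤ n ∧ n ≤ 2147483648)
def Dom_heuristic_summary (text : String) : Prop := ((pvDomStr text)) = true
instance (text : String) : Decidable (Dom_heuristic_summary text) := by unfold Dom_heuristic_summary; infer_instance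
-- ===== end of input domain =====

-- B replaces A's fused five-field dispatch loop by a field-by-field decomposition
-- (last matching line per prefix, a turn-line sublist for the count, a separate
-- counting pass for speakers); objective: simpler. Same return value on the domain.

-- shared helpers (identical code in both Python sources):
-- [ln.strip() for ln in text.splitlines() if ln.strip()]
def pvCleanLines (text : String) : List String :=
  ((PySem.Str.splitlines text).map PySem.Str.strip).filter (fun ln => ln ≠ "")

-- ln.split(":", 1)[-1].strip()
def pvSplitVal (ln : String) : String :=
  PySem.Str.strip (PySem.List.pyGetD ((PySem.Str.splitMax? ln ":" 1).getD []) (-1) "")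

-- ln.split("]", 1)[-1].strip().split(":", 1)[0]
def pvSpeaker (ln : String) : String :=
  let rest := PySem.Str.strip (PySem.List.pyGetD ((PySem.Str.splitMax? ln "]" 1).getD []) (-1) "")
  PySem.List.pyGetD ((PySem.Str.splitMax? rest ":" 1).getD []) 0 ""

-- f"{s}({c})"
def pvFmtSpeaker (sc : String × Int) : String :=
  PySem.Str.join "" [sc.1, "(", PySem.Int.toStr sc.2, ")"]

-- ===== PORT A =====
-- the body of A's single for-loop (if/elif dispatch on the prefix of ln)
def pvStepA (st : String × String × String × Int × PySem.Dict String Int) (ln : String) :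
    String × String × String × Int × PySem.Dict String Int :=
  let (party, vote, result, n, speakers) := st
  if PySem.Str.startswith ln "- Proposed party:" then
    (pvSplitVal ln, vote, result, n, speakers)
  else if PySem.Str.startswith ln "- Party vote:" then
    (party, pvSplitVal ln, result, n, speakers)
  else if PySem.Str.startswith ln "- Quest result:" then
    (party, vote, pvSplitVal ln, n, speakers)
  else if PySem.Str.startswith ln "[Turn " then
    (party, vote, result, n + 1, speakers.modify (pvSpeaker ln) 0 (· + 1))
  else
    (party, vote, result, n, speakers)

def heuristic_summary (text : String) : String :=
  let lines := pvCleanLines text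
  let st := lines.foldl pvStepA ("unknown", "unknown", "unknown", (0 : Int), PySem.Dict.empty)
  let (party, vote, result, n_msgs, speakers) := st
  let joined := PySem.Str.join ", "
    (((PySem.List.sorted speakers.items (fun x => -x.2) false).take 3).map pvFmtSpeaker)
  let top_speakers := if joined = "" then "none" else joined
  PySem.Str.join "" [PySem.Str.join "\n"
    [ "HEURISTIC SUMMARY:",
      PySem.Str.join "" ["- Party: ", party],
      PySem.Str.join "" ["- Vote: ", vote],
      PySem.Str.join "" ["- Result: ", result],
      PySem.Str.join "" ["- Messages: ", PySem.Int.toStr n_msgs],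
      PySem.Str.join "" ["- Top speakers: ", top_speakers] ], "\n"]

-- ===== PORT B =====
-- vals[-1] if vals else "unknown", over the lines starting with the given prefix
def pvFieldB (lines : List String) (pfx : String) : String :=
  match ((lines.filter (fun ln => PySem.Str.startswith ln pfx)).map pvSplitVal).getLast? with
  | some v => v
  | none => "unknown"

def heuristic_summary_alt (text : String) : String :=
  let lines := pvCleanLines text
  let turns := lines.filter (fun ln => PySem.Str.startswith ln "[Turn ")
  let counts := turns.foldl
    (fun d ln => d.insert (pvSpeaker ln) (d.getD (pvSpeaker ln) 0 + 1)) PySem.Dict.empty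
  let joined := PySem.Str.join ", "
    (((PySem.List.sorted counts.items (fun x => -x.2) false).take 3).map pvFmtSpeaker)
  let top_speakers := if joined = "" then "none" else joined
  PySem.Str.join ""
    [ "HEURISTIC SUMMARY:\n- Party: ", pvFieldB lines "- Proposed party:",
      "\n- Vote: ", pvFieldB lines "- Party vote:",
      "\n- Result: ", pvFieldB lines "- Quest result:",
      "\n- Messages: ", PySem.Int.toStr (turns.length : Int),
      "\n- Top speakers: ", top_speakers, "\n"]

-- ===== PRECONDITION & SPEC =====
def Spec_heuristic_summary (text : String) (out : String) : Prop := out = heuristic_summary_alt text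
instance (text : String) (out : String) : Decidable (Spec_heuristic_summary text out) := by unfold Spec_heuristic_summary; infer_instance

-- ===== CLAIM (what is proved, stated in full; the proofs are below) =====
def Claim_equal_heuristic_summary : Prop := ∀ (text : String), Dom_heuristic_summary text → Spec_heuristic_summary text (heuristic_summary text)

-- ===== LEMMAS AND PROOFS =====

-- two string prefixes that are not prefixes of one another cannot both start s
theorem pv_excl (s p q : String) (h : PySem.Str.startswith s p = true)
    (hpq : ¬ (p.toList <+: q.toList)) (hqp : ¬ (q.toList <+: p.toList)) :
    PySem.Str.startswith s q = false := by
  by_contra hc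
  have hq' : PySem.Str.startswith s q = true := by
    cases hval : PySem.Str.startswith s q with
    | false => exact absurd hval hc
    | true => rfl
  have h1 : p.toList <+: s.toList :=
    (PySem.Chars.startswith_iff s.toList p.toList).1 (by simpa using h)
  have h2 : q.toList <+: s.toList :=
    (PySem.Chars.startswith_iff s.toList q.toList).1 (by simpa using hq')
  rcases List.prefix_or_prefix_of_prefix h1 h2 with hcase | hcase
  · exact hpq hcase
  · exact hqp hcase

-- the fused loop of A computed field by field
theorem pv_foldA_decomp (lines : List String) :
    ∀ (p v r : String) (n : Int) (d : PySem.Dict String Int),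
    lines.foldl pvStepA (p, v, r, n, d) =
      ( ((lines.filter (fun ln => PySem.Str.startswith ln "- Proposed party:")).map pvSplitVal).getLast?.getD p,
        ((lines.filter (fun ln => PySem.Str.startswith ln "- Party vote:")).map pvSplitVal).getLast?.getD v,
        ((lines.filter (fun ln => PySem.Str.startswith ln "- Quest result:")).map pvSplitVal).getLast?.getD r,
        n + ((lines.filter (fun ln => PySem.Str.startswith ln "[Turn ")).length : Int),
        (lines.filter (fun ln => PySem.Str.startswith ln "[Turn ")).foldl
          (fun d ln => d.modify (pvSpeaker ln) 0 (· + 1)) d ) := by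
  induction lines with
  | nil => intro p v r n d; simp
  | cons ln rest ih =>
    intro p v r n d
    rw [List.foldl_cons]
    by_cases h1 : PySem.Str.startswith ln "- Proposed party:" = true
    · have e2 := pv_excl ln "- Proposed party:" "- Party vote:" h1 (by decide) (by decide)
      have e3 := pv_excl ln "- Proposed party:" "- Quest result:" h1 (by decide) (by decide)
      have e4 := pv_excl ln "- Proposed party:" "[Turn " h1 (by decide) (by decide)
      have hs : pvStepA (p, v, r, n, d) ln = (pvSplitVal ln, v, r, n, d) := by
        simp only [pvStepA]; rw [if_pos h1]
      rw [hs, ih]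
      simp [h1, e2, e3, e4, List.getLast?_cons, -PySem.Str.startswith_eq]
    · by_cases h2 : PySem.Str.startswith ln "- Party vote:" = true
      · have e3 := pv_excl ln "- Party vote:" "- Quest result:" h2 (by decide) (by decide)
        have e4 := pv_excl ln "- Party vote:" "[Turn " h2 (by decide) (by decide)
        have hs : pvStepA (p, v, r, n, d) ln = (p, pvSplitVal ln, r, n, d) := by
          simp only [pvStepA]; rw [if_neg h1, if_pos h2]
        rw [hs, ih]
        simp [h1, h2, e3, e4, List.getLast?_cons, -PySem.Str.startswith_eq]
      · by_cases h3 : PySem.Str.startswith ln "- Quest result:" = true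
        · have e4 := pv_excl ln "- Quest result:" "[Turn " h3 (by decide) (by decide)
          have hs : pvStepA (p, v, r, n, d) ln = (p, v, pvSplitVal ln, n, d) := by
            simp only [pvStepA]; rw [if_neg h1, if_neg h2, if_pos h3]
          rw [hs, ih]
          simp [h1, h2, h3, e4, List.getLast?_cons, -PySem.Str.startswith_eq]
        · by_cases h4 : PySem.Str.startswith ln "[Turn " = true
          · have hs : pvStepA (p, v, r, n, d) ln =
                (p, v, r, n + 1, d.modify (pvSpeaker ln) 0 (· + 1)) := by
              simp only [pvStepA]; rw [if_neg h1, if_neg h2, if_neg h3, if_pos h4]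
            rw [hs, ih]
            simp [h1, h2, h3, h4, -PySem.Str.startswith_eq]
            omega
          · have hs : pvStepA (p, v, r, n, d) ln = (p, v, r, n, d) := by
              simp only [pvStepA]; rw [if_neg h1, if_neg h2, if_neg h3, if_neg h4]
            rw [hs, ih]
            simp [h1, h2, h3, h4, -PySem.Str.startswith_eq]

-- pvFieldB written with getD
theorem pv_field_eq (lines : List String) (pfx : String) :
    pvFieldB lines pfx =
      ((lines.filter (fun ln => PySem.Str.startswith ln pfx)).map pvSplitVal).getLast?.getD "unknown" := by
  unfold pvFieldB
  cases ((lines.filter (fun ln => PySem.Str.startswith ln pfx)).map pvSplitVal).getLast? <;> simp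

-- A's defaultdict increment and B's get-then-insert build the same counter
theorem pv_dict_eq (turns : List String) :
    turns.foldl (fun (d : PySem.Dict String Int) ln => d.modify (pvSpeaker ln) 0 (· + 1)) PySem.Dict.empty
      = turns.foldl (fun (d : PySem.Dict String Int) ln => d.insert (pvSpeaker ln) (d.getD (pvSpeaker ln) 0 + 1)) PySem.Dict.empty := by
  have hA : (turns.map pvSpeaker).foldl (fun (d : PySem.Dict String Int) x => d.modify x 0 (· + 1)) PySem.Dict.empty
      = turns.foldl (fun (d : PySem.Dict String Int) ln => d.modify (pvSpeaker ln) 0 (· + 1)) PySem.Dict.empty := List.foldl_map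
  have hB : (turns.map pvSpeaker).foldl (fun (d : PySem.Dict String Int) x => d.insert x (d.getD x 0 + 1)) PySem.Dict.empty
      = turns.foldl (fun (d : PySem.Dict String Int) ln => d.insert (pvSpeaker ln) (d.getD (pvSpeaker ln) 0 + 1)) PySem.Dict.empty := List.foldl_map
  rw [← hA, ← hB]
  exact (PySem.Dict.counter_eq_foldl (turns.map pvSpeaker)).symm.trans
    (PySem.Dict.foldl_insert_getD_add_one_eq_counter (turns.map pvSpeaker)).symm

-- A's "\n".join(...) + "\n" assembled flat, as B writes it
theorem pv_assemble (party vote result msgs tops : String) :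
    PySem.Str.join "" [PySem.Str.join "\n"
      [ "HEURISTIC SUMMARY:",
        PySem.Str.join "" ["- Party: ", party],
        PySem.Str.join "" ["- Vote: ", vote],
        PySem.Str.join "" ["- Result: ", result],
        PySem.Str.join "" ["- Messages: ", msgs],
        PySem.Str.join "" ["- Top speakers: ", tops] ], "\n"]
    = PySem.Str.join ""
      [ "HEURISTIC SUMMARY:\n- Party: ", party,
        "\n- Vote: ", vote,
        "\n- Result: ", result,
        "\n- Messages: ", msgs,
        "\n- Top speakers: ", tops, "\n"] := by
  rw [← String.toList_inj]
  simp [PySem.Str.toList_join, PySem.Chars.join, List.intercalate, List.intersperse]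

-- ===== VERDICT (by name: the statement is the Claim_ definition above) =====
theorem heuristic_summary_spec : Claim_equal_heuristic_summary := by
  unfold Claim_equal_heuristic_summary
  intro text _h
  unfold Spec_heuristic_summary heuristic_summary heuristic_summary_alt
  simp only [pv_foldA_decomp, pv_field_eq, pv_dict_eq, pv_assemble, zero_add]
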